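-- pv_equiv track=rewrite | github.com/yaoguany/ConvJudge | simulation/guideline_utils.py | infer_titles
-- ===== SOURCE A (Python) =====
-- from dataclasses import dataclass
--
-- @dataclass(frozen=True)
-- class GuidelineTitles:
--     cat1: str = "Category 1: Universal Compliance"
--     cat2: str = "Category 2: Intent Triggered Guidelines"
--     cat3: str = "Category 3: Condition Triggered Guidelines"
--
-- def infer_titles(oracle: dict[str, object]) -> dict[str, str]:
--     """Return canonical titles using oracle-provided keys when available."""
--     titles = dict(GuidelineTitles().__dict__)
--     for key in oracle.keys():
--         low = str(key).lower()
--         if low.startswith("category 1"):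
--             titles["cat1"] = key
--         elif low.startswith("category 2"):
--             titles["cat2"] = key
--         elif low.startswith("category 3"):
--             titles["cat3"] = key
--     return titles
-- ===== SOURCE B (Python) =====
-- def infer_titles(oracle: dict[str, object]) -> dict[str, str]:
--     """Return canonical titles using oracle-provided keys when available."""
--     titles = {
--         "cat1": "Category 1: Universal Compliance",
--         "cat2": "Category 2: Intent Triggered Guidelines",
--         "cat3": "Category 3: Condition Triggered Guidelines",
--     }
--     for prefix, slot in (("category 1", "cat1"), ("category 2", "cat2"), ("category 3", "cat3")):
--         for key in oracle.keys():
--             if str(key).lower().startswith(prefix):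
--                 titles[slot] = key
--     return titles
-- ===== Notes on version B (the rewrite author's own statement) =====
-- stated objective: alternative
-- what changed: Replaced A's single pass with an if/elif chain by three independent per-category scans of the oracle keys (last match wins per slot), driven by a (prefix, slot) table.
import Mathlib
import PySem

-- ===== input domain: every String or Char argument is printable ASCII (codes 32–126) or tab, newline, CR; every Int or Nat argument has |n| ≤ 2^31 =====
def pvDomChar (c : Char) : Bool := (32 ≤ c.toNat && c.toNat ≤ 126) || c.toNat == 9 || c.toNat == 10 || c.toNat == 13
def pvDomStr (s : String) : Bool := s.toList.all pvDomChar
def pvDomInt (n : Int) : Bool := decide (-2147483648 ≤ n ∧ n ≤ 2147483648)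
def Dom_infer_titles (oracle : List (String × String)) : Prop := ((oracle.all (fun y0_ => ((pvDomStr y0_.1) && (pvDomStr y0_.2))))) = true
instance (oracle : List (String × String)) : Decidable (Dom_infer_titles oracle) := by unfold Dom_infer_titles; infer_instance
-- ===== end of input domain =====

-- B replaces A's single if/elif pass over the oracle keys by three independent per-category scans
-- driven by a (prefix, slot) table (same O(n) cost; objective: alternative decomposition).


-- shared constant: dict(GuidelineTitles().__dict__)
def pvDefaultTitles : PySem.Dict String String :=
  PySem.Dict.ofList [("cat1", "Category 1: Universal Compliance"),
                     ("cat2", "Category 2: Intent Triggered Guidelines"),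
                     ("cat3", "Category 3: Condition Triggered Guidelines")]

-- ===== PORT A =====
-- loop body of A's single for-loop (if/elif chain)
def pvStepA (titles : PySem.Dict String String) (kv : String × String) : PySem.Dict String String :=
  let low := PySem.Str.lower kv.1
  if PySem.Str.startswith low "category 1" then titles.insert "cat1" kv.1
  else if PySem.Str.startswith low "category 2" then titles.insert "cat2" kv.1
  else if PySem.Str.startswith low "category 3" then titles.insert "cat3" kv.1
  else titles

def infer_titles (oracle : List (String × String)) : List (String × String) :=
  (oracle.foldl pvStepA pvDefaultTitles).items

-- ===== PORT B =====
-- inner loop of B: one scan of the oracle keys for one (prefix, slot) pair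
def pvScanB (oracle : List (String × String)) (titles : PySem.Dict String String)
    (ps : String × String) : PySem.Dict String String :=
  oracle.foldl (fun t kv =>
    if PySem.Str.startswith (PySem.Str.lower kv.1) ps.1 then t.insert ps.2 kv.1 else t) titles

def infer_titles_alt (oracle : List (String × String)) : List (String × String) :=
  (([("category 1", "cat1"), ("category 2", "cat2"), ("category 3", "cat3")] : List (String × String)).foldl
    (pvScanB oracle) pvDefaultTitles).items

-- ===== PRECONDITION & SPEC =====
def Spec_infer_titles (oracle : List (String × String)) (out : List (String × String)) : Prop := out = infer_titles_alt oracle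
instance (oracle : List (String × String)) (out : List (String × String)) : Decidable (Spec_infer_titles oracle out) := by unfold Spec_infer_titles; infer_instance

-- ===== CLAIM (what is proved, stated in full; the proofs are below) =====
def Claim_equal_infer_titles : Prop := ∀ (oracle : List (String × String)), Dom_infer_titles oracle → Spec_infer_titles oracle (infer_titles oracle)

-- ===== LEMMAS AND PROOFS =====

-- the titles dict always has exactly the shape [cat1 ↦ a, cat2 ↦ b, cat3 ↦ c]
def pvMk3 (a b c : String) : PySem.Dict String String :=
  PySem.Dict.mk [("cat1", a), ("cat2", b), ("cat3", c)]

-- the key of the last oracle entry whose lowered key starts with p, else d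
def pvLastM (p : String) (oracle : List (String × String)) (d : String) : String :=
  oracle.foldl (fun acc kv => if PySem.Str.startswith (PySem.Str.lower kv.1) p then kv.1 else acc) d

theorem pvLastM_cons (p : String) (kv : String × String) (rest : List (String × String)) (d : String) :
    pvLastM p (kv :: rest) d = pvLastM p rest (if PySem.Str.startswith (PySem.Str.lower kv.1) p then kv.1 else d) := rfl

theorem pvDefault_eq : pvDefaultTitles = pvMk3 "Category 1: Universal Compliance"
    "Category 2: Intent Triggered Guidelines" "Category 3: Condition Triggered Guidelines" := by
  decide

theorem pvInsert1 (a b c k : String) : (pvMk3 a b c).insert "cat1" k = pvMk3 k b c := by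
  simp [pvMk3, PySem.Dict.insert, PySem.Dict.contains]

theorem pvInsert2 (a b c k : String) : (pvMk3 a b c).insert "cat2" k = pvMk3 a k c := by
  simp [pvMk3, PySem.Dict.insert, PySem.Dict.contains]

theorem pvInsert3 (a b c k : String) : (pvMk3 a b c).insert "cat3" k = pvMk3 a b k := by
  simp [pvMk3, PySem.Dict.insert, PySem.Dict.contains]

-- two distinct prefixes of the same length cannot both be prefixes of s
theorem pvExcl (s p q : String) (hlen : p.toList.length = q.toList.length)
    (hne : p.toList ≠ q.toList) (h : PySem.Str.startswith s p = true) :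
    PySem.Str.startswith s q = false := by
  simp only [PySem.Str.startswith_eq, PySem.Chars.startswith_iff] at h
  rw [PySem.Str.startswith_eq, ← Bool.not_eq_true, PySem.Chars.startswith_iff]
  intro h2
  exact hne ((List.prefix_of_prefix_length_le h h2 (by omega)).eq_of_length hlen)

-- A's fold computes the three last-match values in one pass
theorem pvLemA (oracle : List (String × String)) : ∀ (a b c : String),
    oracle.foldl pvStepA (pvMk3 a b c) =
      pvMk3 (pvLastM "category 1" oracle a) (pvLastM "category 2" oracle b)
            (pvLastM "category 3" oracle c) := by
  induction oracle with
  | nil => intro a b c; simp [pvLastM]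
  | cons kv rest ih =>
    intro a b c
    simp only [List.foldl_cons, pvLastM_cons]
    by_cases h1 : PySem.Str.startswith (PySem.Str.lower kv.1) "category 1" = true
    · have h2 := pvExcl (PySem.Str.lower kv.1) "category 1" "category 2" (by decide) (by decide) h1
      have h3 := pvExcl (PySem.Str.lower kv.1) "category 1" "category 3" (by decide) (by decide) h1
      simp at h1 h2 h3
      simp [pvStepA, h1, h2, h3, pvInsert1, ih]
    · by_cases h2 : PySem.Str.startswith (PySem.Str.lower kv.1) "category 2" = true
      · have h3 := pvExcl (PySem.Str.lower kv.1) "category 2" "category 3" (by decide) (by decide) h2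
        simp at h1 h2 h3
        simp [pvStepA, h1, h2, h3, pvInsert2, ih]
      · by_cases h3 : PySem.Str.startswith (PySem.Str.lower kv.1) "category 3" = true
        · simp at h1 h2 h3
          simp [pvStepA, h1, h2, h3, pvInsert3, ih]
        · simp at h1 h2 h3
          simp [pvStepA, h1, h2, h3, ih]

-- B's single scan for one slot updates exactly that slot to its last-match value
theorem pvLemB1 (oracle : List (String × String)) : ∀ (a b c : String),
    pvScanB oracle (pvMk3 a b c) ("category 1", "cat1") =
      pvMk3 (pvLastM "category 1" oracle a) b c := by
  induction oracle with
  | nil => intro a b c; simp [pvScanB, pvLastM]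
  | cons kv rest ih =>
    intro a b c
    simp only [pvScanB, pvLastM, List.foldl_cons] at *
    by_cases h : PySem.Str.startswith (PySem.Str.lower kv.1) "category 1" = true
    · rw [if_pos h, if_pos h, pvInsert1]
      exact ih kv.1 b c
    · rw [if_neg h, if_neg h]
      exact ih a b c

theorem pvLemB2 (oracle : List (String × String)) : ∀ (a b c : String),
    pvScanB oracle (pvMk3 a b c) ("category 2", "cat2") =
      pvMk3 a (pvLastM "category 2" oracle b) c := by
  induction oracle with
  | nil => intro a b c; simp [pvScanB, pvLastM]
  | cons kv rest ih =>
    intro a b c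
    simp only [pvScanB, pvLastM, List.foldl_cons] at *
    by_cases h : PySem.Str.startswith (PySem.Str.lower kv.1) "category 2" = true
    · rw [if_pos h, if_pos h, pvInsert2]
      exact ih a kv.1 c
    · rw [if_neg h, if_neg h]
      exact ih a b c

theorem pvLemB3 (oracle : List (String × String)) : ∀ (a b c : String),
    pvScanB oracle (pvMk3 a b c) ("category 3", "cat3") =
      pvMk3 a b (pvLastM "category 3" oracle c) := by
  induction oracle with
  | nil => intro a b c; simp [pvScanB, pvLastM]
  | cons kv rest ih =>
    intro a b c
    simp only [pvScanB, pvLastM, List.foldl_cons] at *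
    by_cases h : PySem.Str.startswith (PySem.Str.lower kv.1) "category 3" = true
    · rw [if_pos h, if_pos h, pvInsert3]
      exact ih a b kv.1
    · rw [if_neg h, if_neg h]
      exact ih a b c

-- ===== VERDICT (by name: the statement is the Claim_ definition above) =====
theorem infer_titles_spec : Claim_equal_infer_titles := by
  intro oracle _
  unfold Spec_infer_titles infer_titles infer_titles_alt
  rw [pvDefault_eq, pvLemA, List.foldl_cons, List.foldl_cons, List.foldl_cons, List.foldl_nil,
      pvLemB1, pvLemB2, pvLemB3]
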